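-- pv_equiv track=rewrite | github.com/jinx-707/phishguard | app/services/scoring.py | _tier_reasons
-- ===== SOURCE A (Python) =====
-- from typing import Tuple, List, Optional
--
-- def _convert_reason_to_tiered(reason: str) -> str:
--     """
--     Convert legacy reason strings to tiered format.
--     Maps old verbose reasons to new enterprise-grade format.
--     """
--     reason_lower = reason.lower()
--
--     # Critical mappings
--     if "known malicious" in reason_lower:
--         return "🔴 Known malicious domain"
--     if "campaign" in reason_lower:
--         return "🔴 Infrastructure matches phishing cluster"
--     if "cluster" in reason_lower and "similar" in reason_lower:
--         return "🔴 Infrastructure matches phishing cluster"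
--     if "infrastructure nearly identical" in reason_lower:
--         return "🔴 Infrastructure matches phishing cluster"
--     if "gnn infrastructure similarity" in reason_lower:
--         return "🔴 Infrastructure matches phishing cluster"
--
--     # Warning mappings
--     if "suspicious tld" in reason_lower:
--         return "🟠 Suspicious top-level domain"
--     if "new domain" in reason_lower or "very new domain" in reason_lower:
--         return "🟠 Recently registered domain"
--     if "domain age could not be determined" in reason_lower:
--         return "🟠 Domain age could not be determined"
--     if "no valid ssl" in reason_lower or "ssl" in reason_lower:
--         return "🟠 Invalid or missing SSL certificate"
--     if "fast-flux" in reason_lower or "ttl=" in reason_lower: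
--         return "🟠 Fast-flux DNS detected"
--     if "very high ml" in reason_lower:
--         return "🟠 High phishing text confidence"
--     if "high ml" in reason_lower:
--         return "🟠 High phishing text confidence"
--     if "moderate ml" in reason_lower:
--         return "🟠 Moderate phishing indicators detected"
--     if "strong infrastructure" in reason_lower:
--         return "🟠 Strong infrastructure threat indicators"
--     if "some infrastructure" in reason_lower:
--         return "🟠 Some infrastructure threat indicators"
--     if "composite escalation" in reason_lower:
--         return "🟠 Multiple suspicious indicators detected"
--     if "fast-flux dns auto-escalated" in reason_lower:
--         return "🟠 Fast-flux DNS auto-escalated risk"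
--
--     # Info mappings
--     if "low ml" in reason_lower and "benign" in reason_lower:
--         return "🟢 Content appears benign"
--     if "no significant infrastructure" in reason_lower:
--         return "🟢 No significant infrastructure threats"
--     if "appears safe" in reason_lower or "domain appears safe" in reason_lower:
--         return "🟢 Domain appears safe"
--
--     # Risk level summaries - simplify these
--     if "high risk level" in reason_lower:
--         return "🔴 HIGH risk: immediate attention required"
--     if "medium risk level" in reason_lower:
--         return "🟠 MEDIUM risk: review recommended"
--     if "low risk level" in reason_lower:
--         return "🟢 LOW risk: appears safe"
--
--     # Return original if no mapping found
--     return reason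
--
-- def _tier_reasons(reasons: List[str]) -> List[str]:
--     """
--     Convert a list of reasons to tiered format and sort by tier.
--     Critical (🔴) first, then Warning (🟠), then Info (🟢).
--     """
--     tiered_reasons = [_convert_reason_to_tiered(r) for r in reasons if r]
--
--     # Sort by tier: 🔴 > 🟠 > 🟢
--     tier_order = {"🔴": 0, "🟠": 1, "🟢": 2}
--
--     def get_tier_sort(r: str) -> int:
--         for tier, order in tier_order.items():
--             if r.startswith(tier):
--                 return order
--         return 3  # Unknown tier goes last
--
--     tiered_reasons.sort(key=get_tier_sort)
--
--     # Deduplicate while preserving order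
--     unique_reasons = []
--     seen = set()
--     for r in tiered_reasons:
--         if r and r not in seen:
--             unique_reasons.append(r)
--             seen.add(r)
--
--     return unique_reasons
-- ===== SOURCE B (Python) =====
-- from typing import List
--
--
-- def _convert_reason_to_tiered(reason: str) -> str:
--     reason_lower = reason.lower()
--     if "known malicious" in reason_lower:
--         return "🔴 Known malicious domain"
--     if "campaign" in reason_lower:
--         return "🔴 Infrastructure matches phishing cluster"
--     if "cluster" in reason_lower and "similar" in reason_lower:
--         return "🔴 Infrastructure matches phishing cluster"
--     if "infrastructure nearly identical" in reason_lower: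
--         return "🔴 Infrastructure matches phishing cluster"
--     if "gnn infrastructure similarity" in reason_lower:
--         return "🔴 Infrastructure matches phishing cluster"
--     if "suspicious tld" in reason_lower:
--         return "🟠 Suspicious top-level domain"
--     if "new domain" in reason_lower or "very new domain" in reason_lower:
--         return "🟠 Recently registered domain"
--     if "domain age could not be determined" in reason_lower:
--         return "🟠 Domain age could not be determined"
--     if "no valid ssl" in reason_lower or "ssl" in reason_lower:
--         return "🟠 Invalid or missing SSL certificate"
--     if "fast-flux" in reason_lower or "ttl=" in reason_lower:
--         return "🟠 Fast-flux DNS detected"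
--     if "very high ml" in reason_lower:
--         return "🟠 High phishing text confidence"
--     if "high ml" in reason_lower:
--         return "🟠 High phishing text confidence"
--     if "moderate ml" in reason_lower:
--         return "🟠 Moderate phishing indicators detected"
--     if "strong infrastructure" in reason_lower:
--         return "🟠 Strong infrastructure threat indicators"
--     if "some infrastructure" in reason_lower:
--         return "🟠 Some infrastructure threat indicators"
--     if "composite escalation" in reason_lower:
--         return "🟠 Multiple suspicious indicators detected"
--     if "fast-flux dns auto-escalated" in reason_lower:
--         return "🟠 Fast-flux DNS auto-escalated risk"
--     if "low ml" in reason_lower and "benign" in reason_lower: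
--         return "🟢 Content appears benign"
--     if "no significant infrastructure" in reason_lower:
--         return "🟢 No significant infrastructure threats"
--     if "appears safe" in reason_lower or "domain appears safe" in reason_lower:
--         return "🟢 Domain appears safe"
--     if "high risk level" in reason_lower:
--         return "🔴 HIGH risk: immediate attention required"
--     if "medium risk level" in reason_lower:
--         return "🟠 MEDIUM risk: review recommended"
--     if "low risk level" in reason_lower:
--         return "🟢 LOW risk: appears safe"
--     return reason
--
--
-- def _tier_reasons(reasons: List[str]) -> List[str]:
--     # Single pass: partition converted reasons into four tier buckets
--     # (no sort); then concatenate and dedup keeping first occurrences.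
--     critical, warning, info, unknown = [], [], [], []
--     for r in reasons:
--         if not r:
--             continue
--         t = _convert_reason_to_tiered(r)
--         if t.startswith("🔴"):
--             critical.append(t)
--         elif t.startswith("🟠"):
--             warning.append(t)
--         elif t.startswith("🟢"):
--             info.append(t)
--         else:
--             unknown.append(t)
--     return list(dict.fromkeys(critical + warning + info + unknown))
-- ===== Notes on version B (the rewrite author's own statement) =====
-- stated objective: alternative
-- what changed: Replaces A's stable comparison sort by tier key with a single-pass partition into four tier buckets concatenated in tier order, and A's hand-written seen-set dedup loop with an ordered dedup via dict.fromkeys.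
import Mathlib
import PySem

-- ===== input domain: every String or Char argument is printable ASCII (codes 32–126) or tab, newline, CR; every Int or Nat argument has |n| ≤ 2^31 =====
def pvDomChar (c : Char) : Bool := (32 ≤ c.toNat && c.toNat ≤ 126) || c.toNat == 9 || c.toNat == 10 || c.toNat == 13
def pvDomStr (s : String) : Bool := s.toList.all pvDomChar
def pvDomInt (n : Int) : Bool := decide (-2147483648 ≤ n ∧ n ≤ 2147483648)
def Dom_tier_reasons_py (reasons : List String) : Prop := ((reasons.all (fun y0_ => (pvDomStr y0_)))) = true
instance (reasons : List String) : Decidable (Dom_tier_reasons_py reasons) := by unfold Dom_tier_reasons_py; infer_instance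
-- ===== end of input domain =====

-- B replaces A's stable sort by a single-pass partition into four tier buckets and
-- A's hand-written seen-set loop by an ordered dedup (dict.fromkeys); alternative decomposition.

-- ===== PORT A =====
-- shared helper: literal port of _convert_reason_to_tiered (kept unchanged by B as well)
def convertReasonToTiered (reason : String) : String :=
  let rl := PySem.Str.lower reason
  if PySem.Str.isIn "known malicious" rl then "🔴 Known malicious domain"
  else if PySem.Str.isIn "campaign" rl then "🔴 Infrastructure matches phishing cluster"
  else if PySem.Str.isIn "cluster" rl && PySem.Str.isIn "similar" rl then "🔴 Infrastructure matches phishing cluster"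
  else if PySem.Str.isIn "infrastructure nearly identical" rl then "🔴 Infrastructure matches phishing cluster"
  else if PySem.Str.isIn "gnn infrastructure similarity" rl then "🔴 Infrastructure matches phishing cluster"
  else if PySem.Str.isIn "suspicious tld" rl then "🟠 Suspicious top-level domain"
  else if PySem.Str.isIn "new domain" rl || PySem.Str.isIn "very new domain" rl then "🟠 Recently registered domain"
  else if PySem.Str.isIn "domain age could not be determined" rl then "🟠 Domain age could not be determined"
  else if PySem.Str.isIn "no valid ssl" rl || PySem.Str.isIn "ssl" rl then "🟠 Invalid or missing SSL certificate"
  else if PySem.Str.isIn "fast-flux" rl || PySem.Str.isIn "ttl=" rl then "🟠 Fast-flux DNS detected"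
  else if PySem.Str.isIn "very high ml" rl then "🟠 High phishing text confidence"
  else if PySem.Str.isIn "high ml" rl then "🟠 High phishing text confidence"
  else if PySem.Str.isIn "moderate ml" rl then "🟠 Moderate phishing indicators detected"
  else if PySem.Str.isIn "strong infrastructure" rl then "🟠 Strong infrastructure threat indicators"
  else if PySem.Str.isIn "some infrastructure" rl then "🟠 Some infrastructure threat indicators"
  else if PySem.Str.isIn "composite escalation" rl then "🟠 Multiple suspicious indicators detected"
  else if PySem.Str.isIn "fast-flux dns auto-escalated" rl then "🟠 Fast-flux DNS auto-escalated risk"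
  else if PySem.Str.isIn "low ml" rl && PySem.Str.isIn "benign" rl then "🟢 Content appears benign"
  else if PySem.Str.isIn "no significant infrastructure" rl then "🟢 No significant infrastructure threats"
  else if PySem.Str.isIn "appears safe" rl || PySem.Str.isIn "domain appears safe" rl then "🟢 Domain appears safe"
  else if PySem.Str.isIn "high risk level" rl then "🔴 HIGH risk: immediate attention required"
  else if PySem.Str.isIn "medium risk level" rl then "🟠 MEDIUM risk: review recommended"
  else if PySem.Str.isIn "low risk level" rl then "🟢 LOW risk: appears safe"
  else reason

-- A's inner get_tier_sort: iterate the three tiers in dict order, else 3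
def getTierSort (r : String) : Int :=
  if PySem.Str.startswith r "🔴" then 0
  else if PySem.Str.startswith r "🟠" then 1
  else if PySem.Str.startswith r "🟢" then 2
  else 3

def tier_reasons_py (reasons : List String) : List String :=
  let tiered := (reasons.filter (fun r => !(r == ""))).map convertReasonToTiered
  let sortedR := PySem.List.sorted tiered getTierSort
  let fin := sortedR.foldl
    (fun (acc : List String × PySem.Set String) r =>
      if ¬ r = "" ∧ ¬ r ∈ acc.2 then (acc.1 ++ [r], acc.2.add r) else acc)
    ([], PySem.Set.empty)
  fin.1

-- ===== PORT B =====
def tier_reasons_py_alt (reasons : List String) : List String :=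
  let b := reasons.foldl
    (fun (b : List String × List String × List String × List String) r =>
      if r == "" then b
      else
        let t := convertReasonToTiered r
        if PySem.Str.startswith t "🔴" then (b.1 ++ [t], b.2.1, b.2.2.1, b.2.2.2)
        else if PySem.Str.startswith t "🟠" then (b.1, b.2.1 ++ [t], b.2.2.1, b.2.2.2)
        else if PySem.Str.startswith t "🟢" then (b.1, b.2.1, b.2.2.1 ++ [t], b.2.2.2)
        else (b.1, b.2.1, b.2.2.1, b.2.2.2 ++ [t]))
    ([], [], [], [])
  PySem.List.dedup (b.1 ++ b.2.1 ++ b.2.2.1 ++ b.2.2.2)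

-- ===== PRECONDITION & SPEC =====
def Spec_tier_reasons_py (reasons : List String) (out : List String) : Prop := out = tier_reasons_py_alt reasons
instance (reasons : List String) (out : List String) : Decidable (Spec_tier_reasons_py reasons out) := by unfold Spec_tier_reasons_py; infer_instance

-- ===== CLAIM (what is proved, stated in full; the proofs are below) =====
def Claim_equal_tier_reasons_py : Prop := ∀ (reasons : List String), Dom_tier_reasons_py reasons → Spec_tier_reasons_py reasons (tier_reasons_py reasons)

-- ===== LEMMAS AND PROOFS =====

theorem insertBy_cons {α : Type} (bf : α → α → Bool) (x y : α) (l : List α) :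
    PySem.List.insertBy bf x (y :: l) =
      if bf x y then x :: y :: l else y :: PySem.List.insertBy bf x l := rfl

theorem insertBy_skip {α : Type} (bf : α → α → Bool) (x : α) (ys zs : List α)
    (h : ∀ y ∈ ys, bf x y = false) :
    PySem.List.insertBy bf x (ys ++ zs) = ys ++ PySem.List.insertBy bf x zs := by
  induction ys with
  | nil => simp
  | cons y t ih =>
      simp only [List.cons_append, insertBy_cons, h y (by simp)]
      simp [ih (fun a ha => h a (by simp [ha]))]

theorem insertBy_front {α : Type} (bf : α → α → Bool) (x : α) (zs : List α)
    (h : ∀ z ∈ zs, bf x z = true) :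
    PySem.List.insertBy bf x zs = x :: zs := by
  cases zs with
  | nil => rfl
  | cons z l => simp [insertBy_cons, h z (by simp)]

theorem insert_at (bf : String → String → Bool) (x : String) (ys zs : List String)
    (hys : ∀ y ∈ ys, bf x y = false) (hzs : ∀ z ∈ zs, bf x z = true) :
    PySem.List.insertBy bf x (ys ++ zs) = ys ++ x :: zs := by
  rw [insertBy_skip bf x ys zs hys, insertBy_front bf x zs hzs]

theorem key_cases (r : String) :
    getTierSort r = 0 ∨ getTierSort r = 1 ∨ getTierSort r = 2 ∨ getTierSort r = 3 := by
  unfold getTierSort; split_ifs <;> simp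

theorem foldl_insert_partition (t : List String) :
    ∀ a0 a1 a2 a3 : List String,
    (∀ x ∈ a0, getTierSort x = 0) → (∀ x ∈ a1, getTierSort x = 1) →
    (∀ x ∈ a2, getTierSort x = 2) → (∀ x ∈ a3, getTierSort x = 3) →
    t.foldl (fun acc x => PySem.List.insertBy (fun a b => decide (getTierSort a < getTierSort b)) x acc)
      (a0 ++ a1 ++ a2 ++ a3)
      = (a0 ++ t.filter (fun r => getTierSort r == 0)) ++ (a1 ++ t.filter (fun r => getTierSort r == 1))
        ++ (a2 ++ t.filter (fun r => getTierSort r == 2)) ++ (a3 ++ t.filter (fun r => getTierSort r == 3)) := by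
  induction t with
  | nil => intro a0 a1 a2 a3 _ _ _ _; simp
  | cons x t ih =>
      intro a0 a1 a2 a3 h0 h1 h2 h3
      simp only [List.foldl_cons]
      rcases key_cases x with hx | hx | hx | hx
      · have e : PySem.List.insertBy (fun a b => decide (getTierSort a < getTierSort b)) x
            (a0 ++ a1 ++ a2 ++ a3) = (a0 ++ [x]) ++ a1 ++ a2 ++ a3 := by
          rw [List.append_assoc a0 a1, List.append_assoc a0]
          rw [insert_at (fun a b => decide (getTierSort a < getTierSort b)) x a0 (a1 ++ a2 ++ a3)
            (by intro y hy; simp [hx, h0 y hy])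
            (by intro z hz
                rcases List.mem_append.1 hz with hz | hz
                · rcases List.mem_append.1 hz with hz | hz
                  · simp [hx, h1 z hz]
                  · simp [hx, h2 z hz]
                · simp [hx, h3 z hz])]
          simp
        rw [e, ih (a0 ++ [x]) a1 a2 a3
          (by intro y hy; rcases List.mem_append.1 hy with hy | hy
              · exact h0 y hy
              · simp at hy; subst hy; exact hx) h1 h2 h3]
        simp [hx]
      · have e : PySem.List.insertBy (fun a b => decide (getTierSort a < getTierSort b)) x
            (a0 ++ a1 ++ a2 ++ a3) = a0 ++ (a1 ++ [x]) ++ a2 ++ a3 := by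
          rw [List.append_assoc (a0 ++ a1) a2]
          rw [insert_at (fun a b => decide (getTierSort a < getTierSort b)) x (a0 ++ a1) (a2 ++ a3)
            (by intro y hy
                rcases List.mem_append.1 hy with hy | hy
                · simp [hx, h0 y hy]
                · simp [hx, h1 y hy])
            (by intro z hz
                rcases List.mem_append.1 hz with hz | hz
                · simp [hx, h2 z hz]
                · simp [hx, h3 z hz])]
          simp
        rw [e, ih a0 (a1 ++ [x]) a2 a3 h0
          (by intro y hy; rcases List.mem_append.1 hy with hy | hy
              · exact h1 y hy
              · simp at hy; subst hy; exact hx) h2 h3]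
        simp [hx]
      · have e : PySem.List.insertBy (fun a b => decide (getTierSort a < getTierSort b)) x
            (a0 ++ a1 ++ a2 ++ a3) = a0 ++ a1 ++ (a2 ++ [x]) ++ a3 := by
          rw [insert_at (fun a b => decide (getTierSort a < getTierSort b)) x (a0 ++ a1 ++ a2) a3
            (by intro y hy
                rcases List.mem_append.1 hy with hy | hy
                · rcases List.mem_append.1 hy with hy | hy
                  · simp [hx, h0 y hy]
                  · simp [hx, h1 y hy]
                · simp [hx, h2 y hy])
            (by intro z hz; simp [hx, h3 z hz])]
          simp
        rw [e, ih a0 a1 (a2 ++ [x]) a3 h0 h1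
          (by intro y hy; rcases List.mem_append.1 hy with hy | hy
              · exact h2 y hy
              · simp at hy; subst hy; exact hx) h3]
        simp [hx]
      · have e : PySem.List.insertBy (fun a b => decide (getTierSort a < getTierSort b)) x
            (a0 ++ a1 ++ a2 ++ a3) = a0 ++ a1 ++ a2 ++ (a3 ++ [x]) := by
          rw [PySem.List.insertBy_of_forall_not_before _ x (a0 ++ a1 ++ a2 ++ a3)
            (by intro y hy
                rcases List.mem_append.1 hy with hy | hy
                · rcases List.mem_append.1 hy with hy | hy
                  · rcases List.mem_append.1 hy with hy | hy
                    · simp [hx, h0 y hy]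
                    · simp [hx, h1 y hy]
                  · simp [hx, h2 y hy]
                · simp [hx, h3 y hy])]
          simp
        rw [e, ih a0 a1 a2 (a3 ++ [x]) h0 h1 h2
          (by intro y hy; rcases List.mem_append.1 hy with hy | hy
              · exact h3 y hy
              · simp at hy; subst hy; exact hx)]
        simp [hx]

theorem sorted_partition (t : List String) :
    PySem.List.sorted t getTierSort =
      t.filter (fun r => getTierSort r == 0) ++ t.filter (fun r => getTierSort r == 1)
        ++ t.filter (fun r => getTierSort r == 2) ++ t.filter (fun r => getTierSort r == 3) := by
  have := foldl_insert_partition t [] [] [] [] (by simp) (by simp) (by simp) (by simp)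
  simpa [PySem.List.sorted_eq_foldl_insertBy] using this

theorem dedup_loop_eq (l : List String) :
    (∀ r ∈ l, ¬ r = "") → ∀ u : List String,
    (l.foldl (fun (acc : List String × PySem.Set String) r =>
        if ¬ r = "" ∧ ¬ r ∈ acc.2 then (acc.1 ++ [r], acc.2.add r) else acc) (u, u)).1
      = l.foldl PySem.Set.add u := by
  induction l with
  | nil => intro _ u; rfl
  | cons r l ih =>
      intro h u
      have hr : ¬ r = "" := h r (by simp)
      have h' : ∀ x ∈ l, ¬ x = "" := fun x hx => h x (by simp [hx])
      simp only [List.foldl_cons]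
      by_cases hmem : r ∈ u
      · have hc : PySem.Set.contains u r = true := by
          simpa [PySem.Set.contains] using hmem
        rw [if_neg (by simp [hmem]), PySem.Set.add, if_pos hc]
        exact ih h' u
      · have hc : ¬ PySem.Set.contains u r = true := by
          simpa [PySem.Set.contains] using hmem
        rw [if_pos ⟨hr, hmem⟩, PySem.Set.add, if_neg hc]
        exact ih h' (u ++ [r])

theorem ite_ne_empty {c : Prop} [Decidable c] {a b : String} (ha : ¬ a = "") (hb : ¬ b = "") :
    ¬ (if c then a else b) = "" := by split <;> assumption

set_option maxHeartbeats 1000000 in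
theorem convert_ne_empty (r : String) (h : ¬ r = "") : ¬ convertReasonToTiered r = "" := by
  unfold convertReasonToTiered
  dsimp only
  repeat (first | exact h | refine ite_ne_empty (by decide) ?_)

theorem bucket_partition (rs : List String) :
    ∀ c w i u : List String,
    rs.foldl (fun (b : List String × List String × List String × List String) r =>
      if r == "" then b
      else
        let t := convertReasonToTiered r
        if PySem.Str.startswith t "🔴" then (b.1 ++ [t], b.2.1, b.2.2.1, b.2.2.2)
        else if PySem.Str.startswith t "🟠" then (b.1, b.2.1 ++ [t], b.2.2.1, b.2.2.2)
        else if PySem.Str.startswith t "🟢" then (b.1, b.2.1, b.2.2.1 ++ [t], b.2.2.2)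
        else (b.1, b.2.1, b.2.2.1, b.2.2.2 ++ [t])) (c, w, i, u)
      = (c ++ ((rs.filter (fun r => !(r == ""))).map convertReasonToTiered).filter (fun r => getTierSort r == 0),
         w ++ ((rs.filter (fun r => !(r == ""))).map convertReasonToTiered).filter (fun r => getTierSort r == 1),
         i ++ ((rs.filter (fun r => !(r == ""))).map convertReasonToTiered).filter (fun r => getTierSort r == 2),
         u ++ ((rs.filter (fun r => !(r == ""))).map convertReasonToTiered).filter (fun r => getTierSort r == 3)) := by
  induction rs with
  | nil => intro c w i u; simp
  | cons r rs ih =>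
      intro c w i u
      simp only [List.foldl_cons]
      by_cases hr : r = ""
      · rw [if_pos (by simp [hr])]
        rw [ih c w i u]
        simp [hr]
      · rw [if_neg (by simp [hr])]
        by_cases h0 : PySem.Str.startswith (convertReasonToTiered r) "🔴" = true
        · rw [if_pos h0, ih (c ++ [convertReasonToTiered r]) w i u]
          have hk : getTierSort (convertReasonToTiered r) = 0 := by
            unfold getTierSort; rw [if_pos h0]
          simp [hr, hk]
        · rw [if_neg h0]
          by_cases h1 : PySem.Str.startswith (convertReasonToTiered r) "🟠" = true
          · rw [if_pos h1, ih c (w ++ [convertReasonToTiered r]) i u]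
            have hk : getTierSort (convertReasonToTiered r) = 1 := by
              unfold getTierSort; rw [if_neg h0, if_pos h1]
            simp [hr, hk]
          · rw [if_neg h1]
            by_cases h2 : PySem.Str.startswith (convertReasonToTiered r) "🟢" = true
            · rw [if_pos h2, ih c w (i ++ [convertReasonToTiered r]) u]
              have hk : getTierSort (convertReasonToTiered r) = 2 := by
                unfold getTierSort; rw [if_neg h0, if_neg h1, if_pos h2]
              simp [hr, hk]
            · rw [if_neg h2, ih c w i (u ++ [convertReasonToTiered r])]
              have hk : getTierSort (convertReasonToTiered r) = 3 := by
                unfold getTierSort; rw [if_neg h0, if_neg h1, if_neg h2]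
              simp [hr, hk]

-- ===== VERDICT (by name: the statement is the Claim_ definition above) =====
theorem tier_reasons_py_spec : Claim_equal_tier_reasons_py := by
  intro reasons _
  unfold Spec_tier_reasons_py tier_reasons_py tier_reasons_py_alt
  dsimp only
  have hne : ∀ r ∈ PySem.List.sorted
      ((reasons.filter (fun r => !(r == ""))).map convertReasonToTiered) getTierSort, ¬ r = "" := by
    intro r hr
    rw [PySem.List.mem_sorted] at hr
    obtain ⟨x, hx, rfl⟩ := List.mem_map.1 hr
    exact convert_ne_empty x (by simpa using (List.mem_filter.1 hx).2)
  rw [show (PySem.Set.empty : PySem.Set String) = ([] : List String) from rfl]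
  rw [dedup_loop_eq _ hne [], bucket_partition reasons [] [] [] []]
  dsimp only
  simp only [List.nil_append]
  rw [sorted_partition, PySem.List.dedup_eq_ofList]
  rfl
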